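-- pv_equiv track=rewrite | github.com/lenacorassa/beecrowd-ex | projeto bee.py | erro_informal
-- ===== SOURCE A (Python) =====
-- def erro_informal(texto):
--     erro2=[]
--     count=0
--     for i in range(len(texto)):
--         item=texto[i]
--         if item != ' ':
--             count+=1
--         if item == ' ':
--             count=0
--         if count==1:
--             if item.isalpha():
--                 flag='letra'
--             else:
--                 flag='numero'
--         if count>1:
--             if flag=='letra':
--                 if not item.isalpha():
--                     erro2.append(i)
--     return erro2
-- ===== SOURCE B (Python) =====
-- def erro_informal(texto):
--     erro2 = []
--     n = len(texto)
--     i = 0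
--     while i < n:
--         if texto[i] == ' ':
--             i += 1
--             continue
--         j = i
--         while j < n and texto[j] != ' ':
--             j += 1
--         if texto[i].isalpha():
--             for k in range(i + 1, j):
--                 if not texto[k].isalpha():
--                     erro2.append(k)
--         i = j
--     return erro2
-- ===== Notes on version B (the rewrite author's own statement) =====
-- stated objective: simpler
-- what changed: B tokenizes the text into maximal space-free word spans and only scans the tail of words whose first character is a letter, instead of A's flat scan carrying a position counter and a sticky word-type flag across every character.
import Mathlib
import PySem

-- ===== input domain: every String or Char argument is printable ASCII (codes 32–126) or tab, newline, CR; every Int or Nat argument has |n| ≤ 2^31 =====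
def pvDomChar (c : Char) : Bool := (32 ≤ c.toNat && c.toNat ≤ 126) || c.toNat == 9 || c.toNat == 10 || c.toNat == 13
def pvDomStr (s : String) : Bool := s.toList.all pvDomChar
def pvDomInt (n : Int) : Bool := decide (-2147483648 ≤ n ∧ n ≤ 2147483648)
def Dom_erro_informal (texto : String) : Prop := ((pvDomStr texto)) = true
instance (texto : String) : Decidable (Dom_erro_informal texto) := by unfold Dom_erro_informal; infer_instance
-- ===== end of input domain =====

-- B replaces A's flat counter/flag scan with a word-span decomposition (simpler); same return value, no side effects.

-- ===== PORT A =====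
-- flat scan: count = position within the current word, flag set at each word's first char
def pvGoA : List Char → Int → Int → String → List Int
  | [], _, _, _ => []
  | item :: rest, i, count, flag =>
    let count := if item ≠ ' ' then count + 1 else count
    let count := if item = ' ' then 0 else count
    let flag := if count = 1 then (if PySem.Chars.isalpha item then "letra" else "numero") else flag
    (if count > 1 then (if flag = "letra" then (if !(PySem.Chars.isalpha item) then [i] else []) else []) else [])
      ++ pvGoA rest (i + 1) count flag

def erro_informal (texto : String) : List Int := pvGoA texto.toList 0 0 ""

-- ===== PORT B =====
-- inner loop of B: flag every non-alpha char of a word tail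
def pvWordErrs : List Char → Int → List Int
  | [], _ => []
  | c :: rest, k => (if !(PySem.Chars.isalpha c) then [k] else []) ++ pvWordErrs rest (k + 1)

-- outer loop of B: skip spaces, take one maximal space-free word span at a time
def pvGoB : List Char → Int → List Int
  | [], _ => []
  | c :: rest, i =>
    if c = ' ' then pvGoB rest (i + 1)
    else
      let w := rest.takeWhile (· ≠ ' ')
      (if PySem.Chars.isalpha c then pvWordErrs w (i + 1) else [])
        ++ pvGoB (rest.dropWhile (· ≠ ' ')) (i + 1 + w.length)
termination_by cs _ => cs.length
decreasing_by
  all_goals simp only [List.length_cons, Nat.lt_succ_iff]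
  all_goals first
    | exact Nat.le_refl _
    | exact List.length_dropWhile_le _ _

def erro_informal_alt (texto : String) : List Int := pvGoB texto.toList 0

-- ===== PRECONDITION & SPEC =====
def Spec_erro_informal (texto : String) (out : List Int) : Prop := out = erro_informal_alt texto
instance (texto : String) (out : List Int) : Decidable (Spec_erro_informal texto out) := by unfold Spec_erro_informal; infer_instance

-- ===== CLAIM (what is proved, stated in full; the proofs are below) =====
def Claim_equal_erro_informal : Prop := ∀ (texto : String), Dom_erro_informal texto → Spec_erro_informal texto (erro_informal texto)

-- ===== LEMMAS AND PROOFS =====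

-- the first character a dropWhile (· ≠ ' ') keeps is a space
lemma pvDropHead : ∀ (l : List Char) (d : Char) (r2 : List Char),
    l.dropWhile (· ≠ ' ') = d :: r2 → d = ' ' := by
  intro l
  induction l with
  | nil => intro d r2 h; simp [List.dropWhile] at h
  | cons c l ih =>
    intro d r2 h
    rw [List.dropWhile_cons] at h
    by_cases hc : c = ' '
    · rw [if_neg (by simp [hc])] at h
      cases h
      exact hc
    · rw [if_pos (by simp [hc])] at h
      exact ih d r2 h

-- inside a word (no spaces, count ≥ 1) A's scan collects exactly B's word errors when the flag marks a letter-initial word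
lemma pvGoA_word (w : List Char) (tail : List Char) (i : Int) (count : Int) (flag : String)
    (hw : ∀ c ∈ w, c ≠ ' ') (hc : 1 ≤ count) :
    pvGoA (w ++ tail) i count flag
      = (if flag = "letra" then pvWordErrs w i else []) ++ pvGoA tail (i + w.length) (count + w.length) flag := by
  induction w generalizing i count with
  | nil => simp [pvWordErrs]
  | cons c w' ih =>
    have hc' : c ≠ ' ' := hw c (by simp)
    have hgt : ¬ ((count + 1 : Int) = 1) := by omega
    have hgt2 : (count + 1 : Int) > 1 := by omega
    simp only [List.cons_append, pvGoA, if_pos hc', if_neg hc', if_neg hgt, if_pos hgt2]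
    rw [ih (i + 1) (count + 1) (fun x hx => hw x (List.mem_cons_of_mem _ hx)) (by omega)]
    simp only [pvWordErrs, List.length_cons]
    by_cases hf : flag = "letra" <;> by_cases ha : PySem.Chars.isalpha c <;>
      simp [hf, ha] <;> ring_nf

-- main: starting with count = 0 (at start or right after a space), A equals B, whatever stale flag A carries
lemma pvGoA_eq_pvGoB (n : Nat) : ∀ (cs : List Char) (i : Int) (flag : String),
    cs.length ≤ n → pvGoA cs i 0 flag = pvGoB cs i := by
  induction n with
  | zero =>
    intro cs i flag h
    have : cs = [] := List.eq_nil_of_length_eq_zero (Nat.le_zero.mp h)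
    simp [this, pvGoA, pvGoB]
  | succ n ih =>
    intro cs i flag h
    match cs with
    | [] => simp [pvGoA, pvGoB]
    | c :: rest =>
      have hlen : rest.length ≤ n := by simpa using Nat.le_of_succ_le_succ h
      by_cases hc : c = ' '
      · have h1 : pvGoA (c :: rest) i 0 flag = pvGoA rest (i + 1) 0 flag := by
          simp [pvGoA, hc]
        rw [h1, ih rest (i + 1) flag hlen]
        simp [pvGoB, hc]
      · have h1 : pvGoA (c :: rest) i 0 flag
            = pvGoA rest (i + 1) 1 (if PySem.Chars.isalpha c then "letra" else "numero") := by
          simp [pvGoA, hc]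
        have hsplit : rest.takeWhile (· ≠ ' ') ++ rest.dropWhile (· ≠ ' ') = rest :=
          List.takeWhile_append_dropWhile
        have hwchars : ∀ x ∈ rest.takeWhile (· ≠ ' '), x ≠ ' ' := by
          intro x hx
          simpa using List.mem_takeWhile_imp hx
        have hrest' : ∀ (j cnt : Int) (f : String),
            pvGoA (rest.dropWhile (· ≠ ' ')) j cnt f = pvGoB (rest.dropWhile (· ≠ ' ')) j := by
          intro j cnt f
          match hr2 : rest.dropWhile (· ≠ ' ') with
          | [] => simp [pvGoA, pvGoB]
          | d :: r2 =>
            have hd : d = ' ' := pvDropHead rest d r2 hr2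
            have hlen2 : r2.length ≤ n := by
              have h1' : (rest.dropWhile (· ≠ ' ')).length ≤ rest.length :=
                List.length_dropWhile_le _ _
              rw [hr2] at h1'
              simp only [List.length_cons] at h1'
              omega
            have h2 : pvGoA (d :: r2) j cnt f = pvGoA r2 (j + 1) 0 f := by
              simp [pvGoA, hd]
            rw [h2, ih r2 (j + 1) f hlen2]
            simp [pvGoB, hd]
        have hB : pvGoB (c :: rest) i
            = (if PySem.Chars.isalpha c then pvWordErrs (rest.takeWhile (· ≠ ' ')) (i + 1) else [])
              ++ pvGoB (rest.dropWhile (· ≠ ' ')) (i + 1 + (rest.takeWhile (· ≠ ' ')).length) := by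
          simp only [pvGoB, if_neg hc]
        rw [h1, hB, ← hsplit,
          pvGoA_word _ _ (i + 1) 1 _ hwchars le_rfl, hsplit, hrest']
        congr 1
        by_cases ha : PySem.Chars.isalpha c <;> simp [ha]

-- ===== VERDICT (by name: the statement is the Claim_ definition above) =====
theorem erro_informal_spec : Claim_equal_erro_informal := by
  intro texto _
  unfold Spec_erro_informal erro_informal erro_informal_alt
  exact pvGoA_eq_pvGoB texto.toList.length texto.toList 0 "" le_rfl
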